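-- pv_equiv track=rewrite | github.com/Juancho2909/ReduccionMux | ReduccionMux.py | CantidadVariables
-- ===== SOURCE A (Python) =====
-- def CantidadVariables(cadena_ejemplo2):
--     if not cadena_ejemplo2:
--         return 0
--
--     numero = max(cadena_ejemplo2)
--     variables = 0
--     exponente = 1
--
--     while exponente <= numero:
--         variables += 1
--         exponente *= 2
--
--     return variables
-- ===== SOURCE B (Python) =====
-- def CantidadVariables(cadena_ejemplo2):
--     if not cadena_ejemplo2:
--         return 0
--     numero = max(cadena_ejemplo2)
--     return numero.bit_length() if numero > 0 else 0
-- ===== Notes on version B (the rewrite author's own statement) =====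
-- stated objective: idiomatic
-- what changed: The doubling while-loop counting powers of two is replaced by a closed-form int.bit_length() of the maximum (0 when the maximum is not positive).
import Mathlib
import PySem

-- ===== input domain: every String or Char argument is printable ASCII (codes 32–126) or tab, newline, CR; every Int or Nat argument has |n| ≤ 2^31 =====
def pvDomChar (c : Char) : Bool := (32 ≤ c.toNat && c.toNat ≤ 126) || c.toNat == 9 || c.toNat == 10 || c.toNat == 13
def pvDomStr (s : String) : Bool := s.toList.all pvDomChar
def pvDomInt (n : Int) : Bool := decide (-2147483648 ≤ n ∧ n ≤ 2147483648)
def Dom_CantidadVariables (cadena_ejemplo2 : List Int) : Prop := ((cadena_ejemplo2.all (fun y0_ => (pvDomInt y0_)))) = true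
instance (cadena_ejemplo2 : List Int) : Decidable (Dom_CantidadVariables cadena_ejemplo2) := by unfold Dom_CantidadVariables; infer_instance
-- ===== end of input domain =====

-- ===== PORT A =====
-- B replaces the doubling while-loop with a closed-form bit-length of the maximum (idiomatic; same cost).
-- literal port of A's while-loop; the '1 ≤ exponente' guard only ensures termination
-- (the loop is always entered with exponente = 1, so the guard never changes the value)
def pvLoopA (numero vars exponente : Int) : Int :=
  if exponente ≤ numero then
    if _h : 1 ≤ exponente then
      pvLoopA numero (vars + 1) (exponente * 2)
    else vars
  else vars
termination_by (numero + 1 - exponente).toNat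
decreasing_by omega

def CantidadVariables (cadena_ejemplo2 : List Int) : Int :=
  if cadena_ejemplo2 = [] then 0
  else
    match PySem.List.max? cadena_ejemplo2 (fun x => x) with
    | none => 0
    | some numero => pvLoopA numero 0 1

-- ===== PORT B =====
def CantidadVariables_alt (cadena_ejemplo2 : List Int) : Int :=
  if cadena_ejemplo2 = [] then 0
  else
    match PySem.List.max? cadena_ejemplo2 (fun x => x) with
    | none => 0
    | some numero =>
      -- numero.bit_length() for numero > 0 is Nat.log2 numero.toNat + 1
      if numero > 0 then (Nat.log2 numero.toNat + 1 : Int) else 0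

-- ===== PRECONDITION & SPEC =====
def Spec_CantidadVariables (cadena_ejemplo2 : List Int) (out : Int) : Prop := out = CantidadVariables_alt cadena_ejemplo2
instance (cadena_ejemplo2 : List Int) (out : Int) : Decidable (Spec_CantidadVariables cadena_ejemplo2 out) := by unfold Spec_CantidadVariables; infer_instance

-- ===== CLAIM (what is proved, stated in full; the proofs are below) =====
def Claim_equal_CantidadVariables : Prop := ∀ (cadena_ejemplo2 : List Int), Dom_CantidadVariables cadena_ejemplo2 → Spec_CantidadVariables cadena_ejemplo2 (CantidadVariables cadena_ejemplo2)

-- ===== LEMMAS AND PROOFS =====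
theorem pvLoopA_done (numero vars exponente : Int) (h : numero < exponente) :
    pvLoopA numero vars exponente = vars := by
  unfold pvLoopA; rw [if_neg (by omega)]

theorem pvLoopA_bitlen : ∀ (d N : Nat) (v : Int) (k : Nat), 2 ^ k ≤ N → N < 2 ^ (k + d) →
    pvLoopA (N : Int) v (2 ^ k : Nat) = v + (Nat.log2 N : Int) + 1 - (k : Int) := by
  intro d
  induction d with
  | zero => intro N v k h1 h2; simp at h2; omega
  | succ d ih =>
    intro N v k h1 h2
    have hk : ((2 ^ k : Nat) : Int) ≤ (N : Int) := by exact_mod_cast h1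
    have hk1 : (1 : Int) ≤ ((2 ^ k : Nat) : Int) := by exact_mod_cast Nat.one_le_two_pow
    rw [pvLoopA, if_pos hk, dif_pos hk1]
    have hcast : ((2 ^ k : Nat) : Int) * 2 = ((2 ^ (k + 1) : Nat) : Int) := by
      push_cast [pow_succ]; ring
    rw [hcast]
    by_cases hle : 2 ^ (k + 1) ≤ N
    · have := ih N (v + 1) (k + 1) hle (by rw [show k + 1 + d = k + (d + 1) by omega]; exact h2)
      rw [this]
      have hp := Nat.two_pow_pos (k + 1)
      have : k + 1 ≤ Nat.log2 N := by
        rw [Nat.le_log2 (by omega)]; exact hle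
      push_cast; omega
    · have hlog : Nat.log2 N = k := by
        have hp := Nat.two_pow_pos k
        have hN : N ≠ 0 := by omega
        have h1' : k ≤ Nat.log2 N := (Nat.le_log2 hN).mpr h1
        have h2' : Nat.log2 N < k + 1 := by
          by_contra hh
          exact hle (le_trans (Nat.pow_le_pow_right (by norm_num) (by omega)) (Nat.log2_self_le hN))
        omega
      rw [pvLoopA_done _ _ _ (by exact_mod_cast Nat.lt_of_not_le hle)]
      rw [hlog]; ring

theorem pvLoopA_closed (numero : Int) :
    pvLoopA numero 0 1 = if numero > 0 then (Nat.log2 numero.toNat + 1 : Int) else 0 := by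
  by_cases h : numero > 0
  · rw [if_pos h]
    have hN : numero = (numero.toNat : Int) := by omega
    have h1 : 2 ^ 0 ≤ numero.toNat := by simp; omega
    have h2 : numero.toNat < 2 ^ (0 + numero.toNat) := by
      simpa using Nat.lt_two_pow_self (n := numero.toNat)
    have := pvLoopA_bitlen numero.toNat numero.toNat 0 0 h1 h2
    simp only [pow_zero, Nat.cast_one] at this
    rw [hN]
    simp only [Int.toNat_natCast]
    rw [this]; push_cast; ring
  · rw [if_neg h, pvLoopA_done _ _ _ (by omega)]

-- ===== VERDICT (by name: the statement is the Claim_ definition above) =====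
theorem CantidadVariables_spec : Claim_equal_CantidadVariables := by
  intro c _
  unfold Spec_CantidadVariables CantidadVariables CantidadVariables_alt
  by_cases hc : c = []
  · simp [hc]
  · rw [if_neg hc, if_neg hc]
    cases PySem.List.max? c (fun x => x) with
    | none => rfl
    | some m => exact pvLoopA_closed m
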